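-- pv_equiv track=rewrite | github.com/Bayer-Group/scenarion | scenarion/scenarion.py | build_categorical_scenarios
-- ===== SOURCE A (Python) =====
-- import copy
--
-- def build_categorical_scenarios(x, categorical_col_locs):
--     '''
--     Take a sample represented by an array, x, and generate several
--     new samples such that each generated sample differs only in the
--     values found in categorical_col_locs. Specifically this function
--     is meant to be used with one-hot-encoded categorical data.
--
--     Example:
--
--     [in]: build_categorical_scenarios([2,3,0,0,1], [2,3,4])
--     [out]: [[2,3,1,0,0],
--             [2,3,0,1,0],
--             [2,3,0,0,1]]
--
--     Parameters
--     ----------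
--     x - array or list
--         The sample array to use to generate scenarios from.
--
--     categorical_col_locs - list of ints
--         The positions in x that correspond to the one-hot-encoded
--         categorical input.
--
--     Return
--     ------
--     A list of arrays/lists containing the new scenarios
--     '''
--     scenarios = []
--
--     for i in categorical_col_locs:
--         new_x = copy.copy(x)
--         for j in categorical_col_locs:
--             if i == j:
--                 new_x[j] = 1
--             else:
--                 new_x[j] = 0
--
--         scenarios.append(new_x)
--
--     return scenarios
-- ===== SOURCE B (Python) =====
-- import copy
--
-- def build_categorical_scenarios(x, categorical_col_locs):
--     # Build the all-zero base once, then toggle a single position per scenario.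
--     base = copy.copy(x)
--     for j in categorical_col_locs:
--         base[j] = 0
--     scenarios = []
--     for i in categorical_col_locs:
--         new_x = copy.copy(base)
--         new_x[i] = 1
--         scenarios.append(new_x)
--     return scenarios
-- ===== Notes on version B (the rewrite author's own statement) =====
-- stated objective: alternative
-- what changed: B precomputes one zeroed base row with a single pass over categorical_col_locs and then builds each scenario by copying the base and toggling a single index, instead of A's nested loop that rescans all locations for every scenario; this drops the quadratic inner rescan (O(k^2) writes -> O(k)), though row copying still dominates.
-- intended difference: When categorical_col_locs contains both a negative location and its positive alias (a and a+len(x)), A's last write for the aliased cell wins so the scenario for the earlier alias loses its 1 (e.g. A gives [[0,6],[1,6]] on ([5,6],[0,-2])), while B gives each scenario a 1 at its own location ([[1,6],[1,6]]), which is the intended one-hot output. — e.g. on build_categorical_scenarios([5, 6], [0, -2]): A returns [[0, 6], [1, 6]], B returns [[1, 6], [1, 6]]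
import Mathlib
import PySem

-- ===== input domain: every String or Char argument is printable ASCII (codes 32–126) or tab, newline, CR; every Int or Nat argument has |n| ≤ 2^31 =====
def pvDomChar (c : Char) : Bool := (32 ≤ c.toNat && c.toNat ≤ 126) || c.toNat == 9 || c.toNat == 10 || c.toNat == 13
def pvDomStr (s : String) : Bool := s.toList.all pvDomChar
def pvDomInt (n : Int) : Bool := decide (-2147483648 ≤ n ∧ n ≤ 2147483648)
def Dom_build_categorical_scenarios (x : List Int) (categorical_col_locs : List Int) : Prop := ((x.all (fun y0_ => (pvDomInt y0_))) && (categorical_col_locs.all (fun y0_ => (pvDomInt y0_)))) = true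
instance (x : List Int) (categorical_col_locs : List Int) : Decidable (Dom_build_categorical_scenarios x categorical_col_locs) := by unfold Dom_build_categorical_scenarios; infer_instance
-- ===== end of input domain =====

-- B replaces A's nested rescan of categorical_col_locs with one precomputed zeroed base row
-- plus a single-index toggle per scenario (alternative decomposition; row copies still dominate).


-- ===== PORT A =====
def build_categorical_scenarios (x : List Int) (categorical_col_locs : List Int) : List (List Int) :=
  categorical_col_locs.foldl (fun scenarios i =>
    let new_x := categorical_col_locs.foldl (fun new_x j =>
      if i == j then PySem.List.pySetD new_x j 1 else PySem.List.pySetD new_x j 0) x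
    scenarios ++ [new_x]) []

-- ===== PORT B =====
-- helper of B: copy the base and set position i to 1
def pvOneHot (base : List Int) (i : Int) : List Int := PySem.List.pySetD base i 1

def build_categorical_scenarios_alt (x : List Int) (categorical_col_locs : List Int) : List (List Int) :=
  let base := categorical_col_locs.foldl (fun base j => PySem.List.pySetD base j 0) x
  categorical_col_locs.map (fun i => pvOneHot base i)

-- ===== PRECONDITION & SPEC =====
-- Pre_ excludes exactly the inputs on which A raises IndexError: some location out of range for x.
def Pre_build_categorical_scenarios (x : List Int) (categorical_col_locs : List Int) : Prop :=
  ∀ j ∈ categorical_col_locs, PySem.Raise.InRange x.length j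
instance (x : List Int) (categorical_col_locs : List Int) : Decidable (Pre_build_categorical_scenarios x categorical_col_locs) := by unfold Pre_build_categorical_scenarios; infer_instance

def pvWitness_build_categorical_scenarios : List Int × List Int := ([2, 3, 0, 0, 1], [2, 3, 4])

-- When categorical_col_locs contains both a negative location a and its positive alias a+len(x),
-- A's last write for the aliased cell wins so the scenario for the earlier alias loses its 1,
-- while B gives every scenario a 1 at its own location, which is the intended one-hot output.
def D_build_categorical_scenarios (x : List Int) (categorical_col_locs : List Int) : Prop :=
  ∃ a ∈ categorical_col_locs, a < 0 ∧ (a + (x.length : Int)) ∈ categorical_col_locs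
instance (x : List Int) (categorical_col_locs : List Int) : Decidable (D_build_categorical_scenarios x categorical_col_locs) := by unfold D_build_categorical_scenarios; infer_instance

def Spec_build_categorical_scenarios (x : List Int) (categorical_col_locs : List Int) (out : List (List Int)) : Prop := ¬ D_build_categorical_scenarios x categorical_col_locs → out = build_categorical_scenarios_alt x categorical_col_locs
instance (x : List Int) (categorical_col_locs : List Int) (out : List (List Int)) : Decidable (Spec_build_categorical_scenarios x categorical_col_locs out) := by unfold Spec_build_categorical_scenarios; infer_instance

def pvDiffWitness_build_categorical_scenarios : List Int × List Int := ([5, 6], [0, -2])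
def pvDiffWitnessOut_build_categorical_scenarios : (List (List Int)) × (List (List Int)) :=
  ([[0, 6], [1, 6]], [[1, 6], [1, 6]])

-- ===== CLAIM =====
def Claim_unchanged_build_categorical_scenarios : Prop := ∀ (x : List Int) (categorical_col_locs : List Int), Dom_build_categorical_scenarios x categorical_col_locs → Pre_build_categorical_scenarios x categorical_col_locs → Spec_build_categorical_scenarios x categorical_col_locs (build_categorical_scenarios x categorical_col_locs)
def Claim_changed_build_categorical_scenarios : Prop := Dom_build_categorical_scenarios (pvDiffWitness_build_categorical_scenarios.1) (pvDiffWitness_build_categorical_scenarios.2) ∧ Pre_build_categorical_scenarios (pvDiffWitness_build_categorical_scenarios.1) (pvDiffWitness_build_categorical_scenarios.2) ∧ D_build_categorical_scenarios (pvDiffWitness_build_categorical_scenarios.1) (pvDiffWitness_build_categorical_scenarios.2) ∧ build_categorical_scenarios (pvDiffWitness_build_categorical_scenarios.1) (pvDiffWitness_build_categorical_scenarios.2) = pvDiffWitnessOut_build_categorical_scenarios.1 ∧ build_categorical_scenarios_alt (pvDiffWitness_build_categorical_scenarios.1) (pvDiffWitness_build_categorical_scenarios.2) = pvDiffWitnessOut_build_categorical_scenarios.2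 ∧ pvDiffWitnessOut_build_categorical_scenarios.1 ≠ pvDiffWitnessOut_build_categorical_scenarios.2
def Claim_exact_build_categorical_scenarios : Prop := ∀ (x : List Int) (categorical_col_locs : List Int), Dom_build_categorical_scenarios x categorical_col_locs → Pre_build_categorical_scenarios x categorical_col_locs → D_build_categorical_scenarios x categorical_col_locs → build_categorical_scenarios x categorical_col_locs ≠ build_categorical_scenarios_alt x categorical_col_locs

-- ===== LEMMAS AND PROOFS =====

-- the Nat index Python's xs[j] = v actually writes to, for an in-range j
def nmIdx (len : Nat) (j : Int) : Nat := (if j < 0 then j + len else j).toNat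

-- a fold of in-place writes, value g j at each location j, with the row length fixed at len
def writeAll (len : Nat) (g : Int → Int) (locs : List Int) (x : List Int) : List Int :=
  locs.foldl (fun a j => a.set (nmIdx len j) (g j)) x

theorem nmIdx_lt {len : Nat} {j : Int} (h : PySem.Raise.InRange len j) : nmIdx len j < len := by
  obtain ⟨h1, h2⟩ := h; unfold nmIdx; split <;> omega

theorem pySetD_norm (xs : List Int) (j v : Int) (h : PySem.Raise.InRange xs.length j) :
    PySem.List.pySetD xs j v = xs.set (nmIdx xs.length j) v := by
  obtain ⟨h1, h2⟩ := h
  simp only [PySem.List.pySetD, PySem.List.pySet?, PySem.List.pyIdx?, nmIdx]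
  split_ifs with h3 h4 h5 <;> simp <;> try omega
  · congr 1; omega

theorem length_writeAll (len : Nat) (g : Int → Int) (locs x : List Int) :
    (writeAll len g locs x).length = x.length := by
  induction locs generalizing x with
  | nil => rfl
  | cons j rest ih => simp only [writeAll, List.foldl_cons] at *; rw [ih]; simp

theorem fold_pySetD_eq_writeAll (g : Int → Int) (locs x : List Int)
    (h : ∀ j ∈ locs, PySem.Raise.InRange x.length j) :
    locs.foldl (fun a j => PySem.List.pySetD a j (g j)) x = writeAll x.length g locs x := by
  induction locs generalizing x with
  | nil => rfl
  | cons j rest ih =>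
    simp only [List.foldl_cons, writeAll] at *
    rw [pySetD_norm x j (g j) (h j (by simp))]
    have := ih (x.set (nmIdx x.length j) (g j))
      (fun j' hj => by rw [List.length_set]; exact h j' (by simp [hj]))
    simpa [List.length_set] using this

theorem getElem?_writeAll (len : Nat) (g : Int → Int) (locs x : List Int) (k : Nat)
    (hx : x.length = len) (h : ∀ j ∈ locs, PySem.Raise.InRange len j) :
    (writeAll len g locs x)[k]? =
      match locs.reverse.find? (fun j => nmIdx len j == k) with
      | some j => if k < len then some (g j) else none
      | none => x[k]? := by
  induction locs generalizing x with
  | nil => rfl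
  | cons j rest ih =>
    simp only [writeAll, List.foldl_cons, List.reverse_cons] at *
    rw [ih _ (by simp [hx]) (fun j hj => h j (by simp [hj]))]
    rw [List.find?_append]
    cases hf : rest.reverse.find? (fun j => nmIdx len j == k) with
    | some j' => simp
    | none =>
      simp only [Option.none_or, List.find?_cons, List.find?_nil]
      by_cases hk : nmIdx len j = k
      · have hj := nmIdx_lt (h j (by simp))
        have hkl : k < len := hk ▸ hj
        simp [hk, hx, hkl]
      · have hb : (nmIdx len j == k) = false := by simpa using hk
        simp [hb, List.getElem?_set]
        exact fun h' => absurd h' hk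

-- A's scenario row for location i, and B's
def rowA (len : Nat) (locs : List Int) (x : List Int) (i : Int) : List Int :=
  writeAll len (fun j => if i == j then 1 else 0) locs x
def rowB (len : Nat) (locs : List Int) (x : List Int) (i : Int) : List Int :=
  (writeAll len (fun _ => 0) locs x).set (nmIdx len i) 1

theorem foldl_append_singleton {α β : Type} (f : α → β) (l : List α) (acc : List β) :
    l.foldl (fun sc i => sc ++ [f i]) acc = acc ++ l.map f := by
  induction l generalizing acc with
  | nil => simp
  | cons i rest ih => simp [ih]

theorem inner_eq_rowA (x locs : List Int) (i : Int)
    (h : ∀ j ∈ locs, PySem.Raise.InRange x.length j) :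
    locs.foldl (fun new_x j =>
        if i == j then PySem.List.pySetD new_x j 1 else PySem.List.pySetD new_x j 0) x
      = rowA x.length locs x i := by
  have hb : (fun (new_x : List Int) (j : Int) =>
        if i == j then PySem.List.pySetD new_x j 1 else PySem.List.pySetD new_x j 0)
      = fun new_x j => PySem.List.pySetD new_x j (if i == j then 1 else 0) := by
    funext a j; split <;> simp_all
  rw [hb]
  exact fold_pySetD_eq_writeAll _ locs x h

theorem ports_as_rows (x locs : List Int) (h : ∀ j ∈ locs, PySem.Raise.InRange x.length j) :
    build_categorical_scenarios x locs = locs.map (rowA x.length locs x) ∧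
    build_categorical_scenarios_alt x locs = locs.map (rowB x.length locs x) := by
  constructor
  · unfold build_categorical_scenarios
    rw [foldl_append_singleton]
    simp only [List.nil_append]
    exact List.map_congr_left (fun i _ => inner_eq_rowA x locs i h)
  · unfold build_categorical_scenarios_alt
    rw [fold_pySetD_eq_writeAll (fun _ => 0) locs x h]
    apply List.map_congr_left
    intro i hi
    unfold pvOneHot rowB
    have hlen : (writeAll x.length (fun _ => 0) locs x).length = x.length :=
      length_writeAll _ _ _ _
    rw [pySetD_norm _ i 1 (by rw [hlen]; exact h i hi), hlen]

theorem nm_inj (len : Nat) (a b : Int) (ha : PySem.Raise.InRange len a)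
    (hb : PySem.Raise.InRange len b) (h : nmIdx len a = nmIdx len b) :
    a = b ∨ (a < 0 ∧ a + len = b) ∨ (b < 0 ∧ b + len = a) := by
  obtain ⟨ha1, ha2⟩ := ha; obtain ⟨hb1, hb2⟩ := hb
  unfold nmIdx at h; split_ifs at h <;> omega

-- outside the alias region, only i itself writes to i's cell, so A's row is B's row
theorem row_eq (len : Nat) (locs x : List Int) (i : Int)
    (hx : x.length = len) (h : ∀ j ∈ locs, PySem.Raise.InRange len j)
    (hi : i ∈ locs) (hD : ¬ ∃ a ∈ locs, a < 0 ∧ (a + (len : Int)) ∈ locs) :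
    rowA len locs x i = rowB len locs x i := by
  have hinj : ∀ j' ∈ locs, nmIdx len j' = nmIdx len i → j' = i := by
    intro j' hj' hnm
    rcases nm_inj len j' i (h j' hj') (h i hi) hnm with h1 | ⟨h2, h3⟩ | ⟨h2, h3⟩
    · exact h1
    · exact absurd ⟨j', hj', h2, h3 ▸ hi⟩ hD
    · exact absurd ⟨i, hi, h2, h3 ▸ hj'⟩ hD
  apply List.ext_getElem?
  intro k
  have hbl : (writeAll len (fun _ => 0) locs x).length = len :=
    (length_writeAll _ _ _ _).trans hx
  rw [rowA, rowB, getElem?_writeAll len _ locs x k hx h, List.getElem?_set,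
    getElem?_writeAll len _ locs x k hx h, hbl]
  by_cases hik : nmIdx len i = k
  · have hklen : k < len := hik ▸ nmIdx_lt (h i hi)
    cases hf : locs.reverse.find? (fun j => nmIdx len j == k) with
    | none =>
      exfalso
      have := List.find?_eq_none.mp hf i (by simpa using hi)
      simp [hik] at this
    | some j' =>
      have hj'm : j' ∈ locs := by
        have := List.mem_of_find?_eq_some hf; simpa using this
      have hj'p : nmIdx len j' = k := by
        have := List.find?_some hf; simpa using this
      have : j' = i := hinj j' hj'm (hj'p.trans hik.symm)
      simp [hik, hklen, this]
  · cases hf : locs.reverse.find? (fun j => nmIdx len j == k) with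
    | none => simp [hik]
    | some j' =>
      have hj'm : j' ∈ locs := by
        have := List.mem_of_find?_eq_some hf; simpa using this
      have hj'p : nmIdx len j' = k := by
        have := List.find?_some hf; simpa using this
      have hne : i ≠ j' := fun he => hik (he ▸ hj'p)
      have : (i == j') = false := by simpa using hne
      simp [hik, this]

-- ===== VERDICT =====
theorem build_categorical_scenarios_spec : Claim_unchanged_build_categorical_scenarios := by
  intro x locs _ hPre hnD
  obtain ⟨hA, hB⟩ := ports_as_rows x locs hPre
  rw [hA, hB]
  exact List.map_inj_left.mpr (fun i hi => row_eq x.length locs x i rfl hPre hi hnD)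

theorem build_categorical_scenarios_changed : Claim_changed_build_categorical_scenarios := by
  unfold Claim_changed_build_categorical_scenarios; decide

theorem build_categorical_scenarios_tight : Claim_exact_build_categorical_scenarios := by
  intro x locs _ hPre hD heq
  obtain ⟨a, ha, haneg, hb⟩ := hD
  obtain ⟨hA, hB⟩ := ports_as_rows x locs hPre
  rw [hA, hB] at heq
  have hpt := List.map_inj_left.mp heq
  have hInRa := hPre a ha
  have hInRb := hPre (a + (x.length : Int)) hb
  have hnmab : nmIdx x.length (a + (x.length : Int)) = nmIdx x.length a := by
    obtain ⟨h1, h2⟩ := hInRa; unfold nmIdx; split_ifs <;> omega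
  have hab : a ≠ a + (x.length : Int) := by obtain ⟨h1, h2⟩ := hInRa; omega
  set k := nmIdx x.length a with hk
  cases hf : locs.reverse.find? (fun j => nmIdx x.length j == k) with
  | none =>
    have := List.find?_eq_none.mp hf a (by simpa using ha)
    simp at this
    exact this hk.symm
  | some j0 =>
    have hj0p : nmIdx x.length j0 = k := by
      have := List.find?_some hf; simpa using this
    -- pick the alias partner different from the last writer j0
    have main : ∀ i, i ∈ locs → nmIdx x.length i = k → i ≠ j0 → False := by
      intro i hiL hik hij0
      have hrow := hpt i hiL
      have := congrArg (fun l => l[k]?) hrow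
      simp only [rowA, rowB] at this
      have hbl : (writeAll x.length (fun _ => 0) locs x).length = x.length :=
        length_writeAll _ _ _ _
      rw [getElem?_writeAll x.length _ locs x k rfl hPre, hf, List.getElem?_set, hbl, hik] at this
      have hklen : k < x.length := hk ▸ nmIdx_lt hInRa
      have hij0' : (i == j0) = false := by simpa using hij0
      simp [hklen, hij0'] at this
    by_cases hj0a : j0 = a
    · exact main (a + (x.length : Int)) hb hnmab (by rw [hj0a]; exact Ne.symm hab)
    · exact main a ha hk.symm (fun he => hj0a he.symm)
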